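-- pv_equiv track=rewrite | github.com/emiliancristea/xeno-search-service | app/core/security.py | is_hostname_blocked
-- ===== SOURCE A (Python) =====
-- BLOCKED_HOSTNAMES = [
--     'localhost',
--     'localhost.localdomain',
--     'local',
--     '*.local',
--     '*.internal',
--     '*.localhost',
--     'metadata.google.internal',  # GCP metadata
--     '169.254.169.254',           # Cloud metadata endpoint
-- ]
--
-- def is_hostname_blocked(hostname: str) -> bool:
--     """Check if a hostname is blocked"""
--     hostname_lower = hostname.lower()
--
--     for blocked in BLOCKED_HOSTNAMES:
--         if blocked.startswith('*.'):
--             # Wildcard match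
--             suffix = blocked[1:]  # Remove the *
--             if hostname_lower.endswith(suffix):
--                 return True
--         elif hostname_lower == blocked:
--             return True
--
--     return False
-- ===== SOURCE B (Python) =====
-- BLOCKED_HOSTNAMES = [
--     'localhost',
--     'localhost.localdomain',
--     'local',
--     '*.local',
--     '*.internal',
--     '*.localhost',
--     'metadata.google.internal',  # GCP metadata
--     '169.254.169.254',           # Cloud metadata endpoint
-- ]
--
-- # B inverts the traversal: instead of looping over the blocklist per call, it
-- # scans the HOSTNAME once.  Exact names are a set; a wildcard '*.X' matches
-- # exactly when some '.' in the hostname is followed by the tail X, so one pass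
-- # over the hostname's characters testing the tail after each dot decides all
-- # wildcard entries at once.
-- _EXACT = frozenset(('localhost', 'localhost.localdomain', 'local',
--                     'metadata.google.internal', '169.254.169.254'))
-- _WILDCARD_NAMES = frozenset(('local', 'internal', 'localhost'))
--
--
-- def is_hostname_blocked(hostname: str) -> bool:
--     """Check if a hostname is blocked"""
--     h = hostname.lower()
--     if h in _EXACT:
--         return True
--     for i, ch in enumerate(h):
--         if ch == '.' and h[i + 1:] in _WILDCARD_NAMES:
--             return True
--     return False
-- ===== Notes on version B (the rewrite author's own statement) =====
-- stated objective: alternative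
-- what changed: B inverts the traversal: instead of looping over the blocklist per call with a per-entry wildcard startswith test, it does one set lookup for exact names and a single scan over the hostname's characters, testing at each dot whether the remaining tail is a wildcard name.
import Mathlib
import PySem

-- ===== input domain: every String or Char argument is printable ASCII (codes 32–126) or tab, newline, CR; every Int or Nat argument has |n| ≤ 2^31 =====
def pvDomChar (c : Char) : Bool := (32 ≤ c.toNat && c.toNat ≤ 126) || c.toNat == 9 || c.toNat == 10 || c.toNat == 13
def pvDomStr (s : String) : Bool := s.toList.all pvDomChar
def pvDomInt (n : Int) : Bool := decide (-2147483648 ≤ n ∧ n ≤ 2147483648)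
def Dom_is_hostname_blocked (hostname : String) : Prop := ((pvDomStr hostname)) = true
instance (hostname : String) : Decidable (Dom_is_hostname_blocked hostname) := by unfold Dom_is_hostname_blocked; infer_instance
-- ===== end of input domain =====

-- B inverts the traversal: instead of looping over the blocklist per call, it does one
-- exact-name set lookup plus a single scan of the hostname testing the tail after each dot;
-- objective: alternative.


-- ===== PORT A =====
def pvBLOCKED : List String :=
  ["localhost", "localhost.localdomain", "local", "*.local", "*.internal",
   "*.localhost", "metadata.google.internal", "169.254.169.254"]

-- A's 'for blocked in BLOCKED_HOSTNAMES' loop with its early returns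
def pvBlockedLoop (hl : String) : List String → Bool
  | [] => false
  | blocked :: rest =>
    if PySem.Str.startswith blocked "*." then
      let suffix := PySem.Str.slice blocked (some 1) none
      if PySem.Str.endswith hl suffix then true else pvBlockedLoop hl rest
    else if hl == blocked then true else pvBlockedLoop hl rest

def is_hostname_blocked (hostname : String) : Bool :=
  pvBlockedLoop (PySem.Str.lower hostname) pvBLOCKED

-- ===== PORT B =====
def pvEXACT : PySem.Set String :=
  PySem.Set.ofList ["localhost", "localhost.localdomain", "local",
                    "metadata.google.internal", "169.254.169.254"]

def pvWILD : PySem.Set String :=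
  PySem.Set.ofList ["local", "internal", "localhost"]

-- B's 'for i, ch in enumerate(h): if ch == '.' and h[i+1:] in _WILDCARD_NAMES'
-- scan: at each character, 'rest' is exactly h[i+1:]
def pvScanDots : List Char → Bool
  | [] => false
  | c :: rest =>
    (c == '.' && PySem.Set.contains pvWILD (String.ofList rest)) || pvScanDots rest

def is_hostname_blocked_alt (hostname : String) : Bool :=
  let h := PySem.Str.lower hostname
  if PySem.Set.contains pvEXACT h then true
  else pvScanDots h.toList

-- ===== PRECONDITION & SPEC =====
def Spec_is_hostname_blocked (hostname : String) (out : Bool) : Prop := out = is_hostname_blocked_alt hostname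
instance (hostname : String) (out : Bool) : Decidable (Spec_is_hostname_blocked hostname out) := by unfold Spec_is_hostname_blocked; infer_instance

-- ===== CLAIM (what is proved, stated in full; the proofs are below) =====
def Claim_equal_is_hostname_blocked : Prop := ∀ (hostname : String), Dom_is_hostname_blocked hostname → Spec_is_hostname_blocked hostname (is_hostname_blocked hostname)

-- ===== LEMMAS AND PROOFS =====
set_option maxRecDepth 20000

-- membership of h[i+1:] in the wildcard-name set, as a proposition on the char list
theorem pv_contains_wild (rest : List Char) :
    (PySem.Set.contains pvWILD (String.ofList rest) = true) ↔
      (rest = "local".toList ∨ rest = "internal".toList ∨ rest = "localhost".toList) := by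
  rw [show pvWILD = ["local", "internal", "localhost"] from by decide]
  simp only [PySem.Set.contains, List.contains_cons, List.contains_nil, Bool.or_eq_true,
    beq_iff_eq, Bool.or_false]
  constructor
  · rintro (h | h | h)
    · exact Or.inl (by simpa [String.toList_ofList] using congrArg String.toList h)
    · exact Or.inr (Or.inl (by simpa [String.toList_ofList] using congrArg String.toList h))
    · exact Or.inr (Or.inr (by simpa [String.toList_ofList] using congrArg String.toList h))
  · rintro (h | h | h) <;> subst h <;> simp [String.ofList_toList]

-- B's hostname scan finds a dot followed by a wildcard name iff the hostname
-- ends with one of the three dotted suffixes.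
theorem pv_scan_iff (l : List Char) :
    pvScanDots l = true ↔
      (".local".toList <:+ l ∨ ".internal".toList <:+ l ∨ ".localhost".toList <:+ l) := by
  rw [show (".local".toList : List Char) = '.' :: "local".toList from by decide,
      show (".internal".toList : List Char) = '.' :: "internal".toList from by decide,
      show (".localhost".toList : List Char) = '.' :: "localhost".toList from by decide]
  induction l with
  | nil => simp [pvScanDots]
  | cons c rest ih =>
    simp only [pvScanDots, Bool.or_eq_true, Bool.and_eq_true, beq_iff_eq, pv_contains_wild, ih,
      List.suffix_cons_iff, List.cons.injEq]
    constructor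
    · rintro (⟨hdot, h | h | h⟩ | h | h | h) <;> subst_vars <;> tauto
    · rintro ((⟨hdot, h⟩ | h) | (⟨hdot, h⟩ | h) | (⟨hdot, h⟩ | h)) <;> subst_vars <;> tauto

-- A tests the 8 blocklist entries in order; rewritten as exact-or-suffix disjunction.
theorem pv_or_shuffle : ∀ (a1 a2 a3 a4 a5 s1 s2 s3 : Bool),
    (a1 || (a2 || (a3 || (s1 || (s2 || (s3 || (a4 || a5))))))) =
    ((a1 || (a2 || (a3 || (a4 || a5)))) || (s1 || (s2 || s3))) := by decide

theorem pv_loop_eq (hl : String) :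
    pvBlockedLoop hl pvBLOCKED =
      (PySem.Set.contains pvEXACT hl ||
        (PySem.Str.endswith hl ".local" || PySem.Str.endswith hl ".internal" ||
         PySem.Str.endswith hl ".localhost")) := by
  rw [show pvEXACT = ["localhost", "localhost.localdomain", "local",
        "metadata.google.internal", "169.254.169.254"] from by decide]
  simp only [pvBLOCKED, pvBlockedLoop]
  norm_num [PySem.Set.contains, List.contains_cons, List.contains_nil,
    show PySem.Chars.startswith "localhost".toList "*.".toList = false from by decide,
    show PySem.Chars.startswith "localhost.localdomain".toList "*.".toList = false from by decide,
    show PySem.Chars.startswith "local".toList "*.".toList = false from by decide,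
    show PySem.Chars.startswith "*.local".toList "*.".toList = true from by decide,
    show PySem.Chars.startswith "*.internal".toList "*.".toList = true from by decide,
    show PySem.Chars.startswith "*.localhost".toList "*.".toList = true from by decide,
    show PySem.Chars.startswith "metadata.google.internal".toList "*.".toList = false from by decide,
    show PySem.Chars.startswith "169.254.169.254".toList "*.".toList = false from by decide,
    show PySem.List.slice "*.local".toList (some 1) none = ".local".toList from by decide,
    show PySem.List.slice "*.internal".toList (some 1) none = ".internal".toList from by decide,
    show PySem.List.slice "*.localhost".toList (some 1) none = ".localhost".toList from by decide]
  rw [pv_or_shuffle]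
  congr 1
  ac_rfl

-- endswith as a decidable suffix proposition
theorem pv_endswith_decide (l s : List Char) :
    PySem.Chars.endswith l s = decide (s <:+ l) := by
  rcases h : PySem.Chars.endswith l s
  · exact (decide_eq_false (fun hs => by
      simp [(PySem.Chars.endswith_iff l s).mpr hs] at h)).symm
  · exact (decide_eq_true ((PySem.Chars.endswith_iff l s).mp h)).symm

theorem pv_main (hl : String) :
    pvBlockedLoop hl pvBLOCKED =
      (if PySem.Set.contains pvEXACT hl then true else pvScanDots hl.toList) := by
  rw [pv_loop_eq]
  rcases he : PySem.Set.contains pvEXACT hl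
  · rw [if_neg (by simp [he])]
    simp only [he, Bool.false_or]
    simp only [PySem.Str.endswith, pv_endswith_decide]
    rcases hb : pvScanDots hl.toList
    · have hnd : ¬(".local".toList <:+ hl.toList ∨ ".internal".toList <:+ hl.toList ∨
          ".localhost".toList <:+ hl.toList) :=
        fun h => by simp [(pv_scan_iff hl.toList).mpr h] at hb
      rw [decide_eq_false (fun h => hnd (Or.inl h)),
          decide_eq_false (fun h => hnd (Or.inr (Or.inl h))),
          decide_eq_false (fun h => hnd (Or.inr (Or.inr h)))]
      rfl
    · rcases (pv_scan_iff hl.toList).mp hb with h | h | h <;>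
        rw [decide_eq_true h] <;> simp
  · simp [he]

-- ===== VERDICT (by name: the statement is the Claim_ definition above) =====
theorem is_hostname_blocked_spec : Claim_equal_is_hostname_blocked := by
  intro hostname _
  unfold Spec_is_hostname_blocked is_hostname_blocked is_hostname_blocked_alt
  exact pv_main (PySem.Str.lower hostname)
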